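-- pv_equiv track=rewrite | github.com/doej37159/ICML_2024 | utils.py | calculate_wr
-- ===== SOURCE A (Python) =====
-- def calculate_wr(
--     r,
--     b
-- ):
--     """
--     Computes wr.
--
--     :param r: Number of days
--     :param b: Max price
--     :return: wr
--     """
--
--     wr = 1
--
--     while (wr - 1) * min(b, r - 1 + wr) <= r * (b - 1):
--         wr += 1
--
--     return wr
-- ===== SOURCE B (Python) =====
-- def calculate_wr(r, b):
--     """
--     Computes wr.
--
--     :param r: Number of days
--     :param b: Max price
--     :return: wr
--     """
--     t = r * (b - 1)
--     if t < 0: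
--         return 1
--     lo, hi = 1, 2
--     while (hi - 1) * min(b, r - 1 + hi) <= t:
--         hi *= 2
--     while lo + 1 < hi:
--         mid = (lo + hi) // 2
--         if (mid - 1) * min(b, r - 1 + mid) <= t:
--             lo = mid
--         else:
--             hi = mid
--     return hi
-- ===== Notes on version B (the rewrite author's own statement) =====
-- stated objective: faster
-- what changed: A scans wr = 1, 2, 3, ... one step at a time until the stopping inequality flips; B returns 1 outright when the threshold r*(b-1) is negative and otherwise exploits monotonicity of the stopping predicate: it doubles an upper bound and binary-searches for the first wr violating the inequality.
import Mathlib
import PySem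

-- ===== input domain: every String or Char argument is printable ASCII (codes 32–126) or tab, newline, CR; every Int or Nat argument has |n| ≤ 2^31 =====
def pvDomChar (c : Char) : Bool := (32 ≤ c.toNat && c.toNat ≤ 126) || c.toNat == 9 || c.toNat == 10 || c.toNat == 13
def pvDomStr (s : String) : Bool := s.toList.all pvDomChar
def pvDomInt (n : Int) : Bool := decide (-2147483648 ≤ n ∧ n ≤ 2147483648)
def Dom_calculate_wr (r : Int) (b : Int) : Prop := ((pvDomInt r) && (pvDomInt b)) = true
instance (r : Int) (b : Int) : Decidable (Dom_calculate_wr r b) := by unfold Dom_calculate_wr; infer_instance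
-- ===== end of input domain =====

-- B replaces A's unit-step linear scan by an exponential-growth + binary-search
-- scan over the same (monotone, under Pre_) stopping predicate.

-- ===== PORT A =====
-- A's 'while' loop, step for step; the Nat argument is fuel making the
-- recursion total (proved ample under Dom ∧ Pre_ below); same state (wr).
def pvLoopA (r b : Int) : Nat → Int → Int
  | 0, wr => wr
  | n+1, wr => if (wr - 1) * min b (r - 1 + wr) ≤ r * (b - 1) then pvLoopA r b n (wr + 1) else wr

def calculate_wr (r : Int) (b : Int) : Int := pvLoopA r b (2^64) 1

-- ===== PORT B =====
-- Source B's first 'while' (hi *= 2), with fuel (proved ample under Dom ∧ Pre_)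
def pvGrow (r b t : Int) : Nat → Int → Int
  | 0, hi => hi
  | n+1, hi => if (hi - 1) * min b (r - 1 + hi) ≤ t then pvGrow r b t n (2 * hi) else hi

-- Source B's second 'while' (binary search); the Nat argument is fuel making the
-- recursion total (proved ample under Dom ∧ Pre_ below); same state (lo, hi)
def pvShrink (r b t : Int) : Nat → Int → Int → Int
  | 0, _, hi => hi
  | n+1, lo, hi =>
    if lo + 1 < hi then
      let mid := PySem.Int.floordiv (lo + hi) 2
      if (mid - 1) * min b (r - 1 + mid) ≤ t then pvShrink r b t n mid hi
      else pvShrink r b t n lo mid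
    else hi

def calculate_wr_alt (r : Int) (b : Int) : Int :=
  let t := r * (b - 1)
  if t < 0 then 1
  else pvShrink r b t 100 1 (pvGrow r b t 100 2)

-- ===== PRECONDITION & SPEC =====
-- Pre_ excludes exactly the inputs (b ≤ 0 with r*(b-1) ≥ 0) on which A's while
-- loop never terminates: there the loop expression stays ≤ r*(b-1) forever.
def Pre_calculate_wr (r : Int) (b : Int) : Prop := 1 ≤ b ∨ r * (b - 1) < 0
instance (r : Int) (b : Int) : Decidable (Pre_calculate_wr r b) := by unfold Pre_calculate_wr; infer_instance
def pvWitness_calculate_wr : Int × Int := (3, 5)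

def Spec_calculate_wr (r : Int) (b : Int) (out : Int) : Prop := out = calculate_wr_alt r b
instance (r : Int) (b : Int) (out : Int) : Decidable (Spec_calculate_wr r b out) := by unfold Spec_calculate_wr; infer_instance

-- ===== CLAIM (what is proved, stated in full; the proofs are below) =====
def Claim_equal_calculate_wr : Prop := ∀ (r : Int) (b : Int), Dom_calculate_wr r b → Pre_calculate_wr r b → Spec_calculate_wr r b (calculate_wr r b)

-- ===== LEMMAS AND PROOFS =====

-- midpoint bounds for the binary-search interval
theorem pv_mid_bounds (lo hi : Int) (h : lo + 1 < hi) :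
    lo < PySem.Int.floordiv (lo + hi) 2 ∧ PySem.Int.floordiv (lo + hi) 2 < hi := by
  constructor
  · have := (PySem.Int.le_floordiv_iff_mul_le (a := lo + hi) (b := 2) (q := lo + 1) (by omega)).mpr (by omega)
    omega
  · have := (PySem.Int.floordiv_lt_iff_lt_mul (a := lo + hi) (b := 2) (q := hi) (by omega)).mpr (by omega)
    exact this

-- the stopping predicate both programs scan for
def pvP (r b wr : Int) : Prop := r * (b - 1) < (wr - 1) * min b (r - 1 + wr)

-- monotonicity of the predicate once the threshold is nonnegative
theorem pvP_mono (r b : Int) (ht : 0 ≤ r * (b - 1)) {x y : Int} (hx : 1 ≤ x) (hxy : x ≤ y)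
    (h : pvP r b x) : pvP r b y := by
  unfold pvP at *
  have hx1 : 0 < x - 1 := by
    rcases lt_or_ge 1 x with h' | h'
    · omega
    · have hx0 : x = 1 := by omega
      subst hx0
      simp at h
      omega
  have hmin : 0 < min b (r - 1 + x) := by
    rcases le_or_gt (min b (r - 1 + x)) 0 with hc | hc
    · exfalso; nlinarith
    · exact hc
  have hminle : min b (r - 1 + x) ≤ min b (r - 1 + y) :=
    min_le_min (le_refl b) (by omega)
  have : (x - 1) * min b (r - 1 + x) ≤ (y - 1) * min b (r - 1 + y) :=
    mul_le_mul (by omega) hminle (by omega) (by omega)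
  linarith

-- A's loop lands exactly on the first hit of the predicate
theorem pvLoopA_eq (r b : Int) : ∀ (n : Nat) (wr res : Int), 1 ≤ wr → wr ≤ res →
    res - wr < n → pvP r b res → (∀ w : Int, wr ≤ w → w < res → ¬ pvP r b w) →
    pvLoopA r b n wr = res := by
  intro n
  induction n with
  | zero => intro wr res _ _ h; omega
  | succ n ih =>
    intro wr res hwr hwres hn hPres hmin
    rcases eq_or_lt_of_le hwres with heq | hlt
    · subst heq
      have : ¬ ((wr - 1) * min b (r - 1 + wr) ≤ r * (b - 1)) := by
        unfold pvP at hPres; omega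
      simp [pvLoopA, this]
    · have h0 : ¬ pvP r b wr := hmin wr (le_refl _) hlt
      have hcond : (wr - 1) * min b (r - 1 + wr) ≤ r * (b - 1) := by
        unfold pvP at h0; omega
      simp only [pvLoopA, if_pos hcond]
      exact ih (wr + 1) res (by omega) (by omega) (by omega) hPres
        (fun w hw1 hw2 => hmin w (by omega) hw2)

theorem pvGrow_spec (r b t : Int) (ht : t = r * (b - 1)) : ∀ (n : Nat) (hi : Int) (j : Nat), 1 ≤ hi →
    j < n → pvP r b (2 ^ j * hi) →
    pvP r b (pvGrow r b t n hi) ∧ hi ≤ pvGrow r b t n hi ∧ pvGrow r b t n hi ≤ 2 ^ j * hi := by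
  intro n
  induction n with
  | zero => intro hi j _ hj; omega
  | succ n ih =>
    intro hi j hhi hj hPj
    by_cases hc : (hi - 1) * min b (r - 1 + hi) ≤ t
    · have hj0 : j ≠ 0 := by
        intro h0; subst h0
        simp only [pow_zero, one_mul] at hPj
        unfold pvP at hPj
        omega
      have he : (2 : Int) ^ (j - 1) * (2 * hi) = 2 ^ j * hi := by
        rw [show (2:Int)^j = 2^(j-1) * 2 by rw [← pow_succ]; congr 1; omega]
        ring
      have hrec := ih (2 * hi) (j - 1) (by omega) (by omega) (by rw [he]; exact hPj)
      simp only [pvGrow, if_pos hc]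
      refine ⟨hrec.1, by omega, ?_⟩
      rw [← he]; exact hrec.2.2
    · simp only [pvGrow, if_neg hc]
      have hp2 : (1 : Int) ≤ 2 ^ j := one_le_pow₀ (by norm_num)
      refine ⟨by unfold pvP; omega, le_refl _, ?_⟩
      nlinarith

theorem pvShrink_spec (r b t : Int) (ht : t = r * (b - 1)) : ∀ (n : Nat) (lo hi : Int),
    hi - lo ≤ 2 ^ n → 1 ≤ lo → lo < hi → ¬ pvP r b lo → pvP r b hi →
    pvP r b (pvShrink r b t n lo hi) ∧ ¬ pvP r b (pvShrink r b t n lo hi - 1) ∧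
      lo < pvShrink r b t n lo hi ∧ pvShrink r b t n lo hi ≤ hi := by
  intro n
  induction n with
  | zero =>
    intro lo hi hfit hlo hlh hnlo hPhi
    have hle : lo = hi - 1 := by omega
    subst hle
    simp only [pvShrink]
    exact ⟨hPhi, by simpa using hnlo, by omega, le_refl _⟩
  | succ n ih =>
    intro lo hi hfit hlo hlh hnlo hPhi
    have hp1 : (1 : Int) ≤ 2 ^ n := one_le_pow₀ (by norm_num)
    have hp2 : (2 : Int) ^ (n + 1) = 2 * 2 ^ n := by rw [pow_succ]; ring
    by_cases h : lo + 1 < hi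
    · have hmid := pv_mid_bounds lo hi h
      have hmid2 : (lo + 1) * 2 ≤ lo + hi ∧ lo + hi < hi * 2 := by
        constructor <;> omega
      have hmlow : lo + hi - 1 ≤ PySem.Int.floordiv (lo + hi) 2 * 2 ∧
          PySem.Int.floordiv (lo + hi) 2 * 2 ≤ lo + hi := by
        have := PySem.Int.floordiv_mul_add_mod (lo + hi) 2
        have hm := PySem.Int.mod_two_eq (lo + hi)
        omega
      set mid := PySem.Int.floordiv (lo + hi) 2 with hm
      by_cases hc : (mid - 1) * min b (r - 1 + mid) ≤ t
      · have hnm : ¬ pvP r b mid := by unfold pvP; omega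
        have hr := ih mid hi (by omega) (by omega) (by omega) hnm hPhi
        rw [pvShrink]
        simp only [if_pos h, ← hm, if_pos hc]
        exact ⟨hr.1, hr.2.1, by omega, hr.2.2.2⟩
      · have hPm : pvP r b mid := by unfold pvP; omega
        have hr := ih lo mid (by omega) hlo (by omega) hnlo hPm
        rw [pvShrink]
        simp only [if_pos h, ← hm, if_neg hc]
        exact ⟨hr.1, hr.2.1, hr.2.2.1, by omega⟩
    · rw [pvShrink]
      simp only [if_neg h]
      have hle : lo = hi - 1 := by omega
      subst hle
      exact ⟨hPhi, by simpa using hnlo, by omega, le_refl _⟩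

-- ===== VERDICT (by name: the statement is the Claim_ definition above) =====
theorem calculate_wr_spec : Claim_equal_calculate_wr := by
  intro r b hdom hpre
  unfold Spec_calculate_wr
  have hr31 : -2147483648 ≤ r ∧ r ≤ 2147483648 := by
    unfold Dom_calculate_wr pvDomInt at hdom
    simp only [Bool.and_eq_true, decide_eq_true_eq] at hdom
    exact hdom.1
  have hb31 : -2147483648 ≤ b ∧ b ≤ 2147483648 := by
    unfold Dom_calculate_wr pvDomInt at hdom
    simp only [Bool.and_eq_true, decide_eq_true_eq] at hdom
    exact hdom.2
  by_cases hneg : r * (b - 1) < 0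
  · -- threshold negative: both programs return 1 immediately
    have hA : calculate_wr r b = 1 :=
      pvLoopA_eq r b (2 ^ 64) 1 1 (le_refl _) (le_refl _) (by norm_num)
        (by unfold pvP; simpa using hneg) (by intro w h1 h2; omega)
    have hB : calculate_wr_alt r b = 1 := by
      unfold calculate_wr_alt
      simp [hneg]
    rw [hA, hB]
  · have ht : 0 ≤ r * (b - 1) := by omega
    have hb1 : 1 ≤ b := by
      rcases hpre with h | h
      · exact h
      · omega
    -- a point where the stopping predicate certainly holds
    set wrs : Int := max 2 (max (b - r + 1) (r + 1)) with hwrs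
    have hwrs2 : 2 ≤ wrs := le_max_left _ _
    have hwbr : b - r + 1 ≤ wrs := le_trans (le_max_left _ _) (le_max_right _ _)
    have hwr1 : r + 1 ≤ wrs := le_trans (le_max_right _ _) (le_max_right _ _)
    have hPwrs : pvP r b wrs := by
      unfold pvP
      rw [min_eq_left (by omega : b ≤ r - 1 + wrs)]
      have h3 : (wrs - 1 - r) * 1 ≤ (wrs - 1 - r) * b :=
        mul_le_mul_of_nonneg_left hb1 (by omega)
      nlinarith
    have hwrsle : wrs ≤ 2 ^ 33 := by
      simp only [hwrs, max_le_iff]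
      norm_num
      omega
    -- B's doubling phase, with j = 32 as the guaranteed hit exponent
    have hg := pvGrow_spec r b (r * (b - 1)) rfl 100 2 32 (by norm_num) (by norm_num)
      (pvP_mono r b ht (by omega) (show wrs ≤ 2 ^ 32 * 2 by norm_num; omega) hPwrs)
    have hn1 : ¬ pvP r b 1 := by unfold pvP; simp; omega
    have hs := pvShrink_spec r b (r * (b - 1)) rfl 100 1 (pvGrow r b (r * (b - 1)) 100 2)
      (by have h2 := hg.2.2
          have h1 : (2:Int) ^ 32 * 2 ≤ 2 ^ 100 := by norm_num
          omega) (le_refl 1) (by omega) hn1 hg.1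
    have hB : calculate_wr_alt r b = pvShrink r b (r * (b - 1)) 100 1 (pvGrow r b (r * (b - 1)) 100 2) := by
      unfold calculate_wr_alt
      simp [hneg]
    rw [hB]
    -- A's unit scan stops exactly at B's binary-search answer
    refine pvLoopA_eq r b (2 ^ 64) 1 _ (le_refl _) (by omega) (by norm_num; omega) hs.1 ?_
    intro w h1 h2
    intro hPw
    exact hs.2.1 (pvP_mono r b ht h1 (by omega) hPw)
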